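-- pv_equiv track=rewrite | github.com/zhenfelix/OnlineJudgeCodings | 塔子哥学算法/腾讯音乐-2023.3.23-第六题-无穷大的二维网格.py | solve
-- ===== SOURCE A (Python) =====
-- def solve(n,l,r):
--     def calc(target):
--         lo, hi = 1, n
--         while lo <= hi:
--             mid = (lo+hi)//2
--             if target <= mid*mid:
--                 hi = mid-1
--             else:
--                 lo = mid+1
--         return (lo-(lo*lo-target)-1,n-lo)
--     def pos(target):
--         if target <= n*n:
--             return calc(target)
--         tot = n*n+(n-1)*(n-1)
--         x, y = calc(tot+1-target)
--         return (-x,-y)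
--     x1, y1 = pos(l)
--     x2, y2 = pos(r)
--     return abs(x1-x2)+abs(y1-y2)
--
--     return True
-- ===== SOURCE B (Python) =====
-- import math
--
-- def solve(n, l, r):
--     def pos(t):
--         tot = n * n + (n - 1) * (n - 1)
--         sgn = 1
--         if t > n * n:
--             t = tot + 1 - t
--             sgn = -1
--         # smallest integer m with t <= m*m, clamped into the search interval [1, n+1]
--         m = max(1, min(n + 1, math.isqrt(max(t - 1, 0)) + 1))
--         return (sgn * (m - (m * m - t) - 1), sgn * (n - m))
--     x1, y1 = pos(l)
--     x2, y2 = pos(r)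
--     return abs(x1 - x2) + abs(y1 - y2)
-- ===== Notes on version B (the rewrite author's own statement) =====
-- stated objective: faster
-- what changed: The O(log n) binary search for the smallest m with target <= m*m is replaced by a closed form: math.isqrt(max(target-1,0))+1 clamped into [1, n+1], and the two helper functions calc/pos are fused into one mirrored-index pos.
import Mathlib
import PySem

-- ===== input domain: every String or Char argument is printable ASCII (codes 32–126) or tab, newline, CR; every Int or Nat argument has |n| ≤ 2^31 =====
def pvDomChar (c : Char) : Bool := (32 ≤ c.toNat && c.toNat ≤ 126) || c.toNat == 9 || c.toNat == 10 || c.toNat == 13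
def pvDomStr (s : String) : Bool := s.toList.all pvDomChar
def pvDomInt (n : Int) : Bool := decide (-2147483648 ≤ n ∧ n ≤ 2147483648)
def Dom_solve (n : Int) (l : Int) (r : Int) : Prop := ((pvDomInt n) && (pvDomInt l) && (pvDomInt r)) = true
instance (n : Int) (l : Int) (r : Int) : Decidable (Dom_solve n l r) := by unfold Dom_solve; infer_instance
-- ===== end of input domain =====

-- B replaces A's inner binary search by a closed form (clamped ceiling integer sqrt); objective: faster.

-- ===== PORT A =====
-- the 'while lo <= hi' binary-search loop of A's calc
def solveCalcLoop (n target lo hi : Int) : Int :=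
  if h : lo ≤ hi then
    let mid := PySem.Int.floordiv (lo + hi) 2
    if target ≤ mid * mid then solveCalcLoop n target lo (mid - 1)
    else solveCalcLoop n target (mid + 1) hi
  else lo
termination_by (hi + 1 - lo).toNat
decreasing_by
  · have := PySem.Int.floordiv_two_mid_bounds h; omega
  · have := PySem.Int.floordiv_two_mid_bounds h; omega

def solveCalc (n target : Int) : Int × Int :=
  let lo := solveCalcLoop n target 1 n
  (lo - (lo * lo - target) - 1, n - lo)

def solvePos (n target : Int) : Int × Int :=
  if target ≤ n * n then solveCalc n target
  else
    let tot := n * n + (n - 1) * (n - 1)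
    let p := solveCalc n (tot + 1 - target)
    (-p.1, -p.2)

def solve (n : Int) (l : Int) (r : Int) : Int :=
  let p1 := solvePos n l
  let p2 := solvePos n r
  |p1.1 - p2.1| + |p1.2 - p2.2|

-- ===== PORT B =====
-- B's pos: flip to the mirrored index first, then a closed-form clamped ceiling sqrt
def solveAltPos (n t : Int) : Int × Int :=
  let tot := n * n + (n - 1) * (n - 1)
  let ts : Int × Int := if t > n * n then (tot + 1 - t, -1) else (t, 1)
  let t' := ts.1
  let sgn := ts.2
  let m : Int := max 1 (min (n + 1) ((Nat.sqrt (max (t' - 1) 0).toNat : Int) + 1))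
  (sgn * (m - (m * m - t') - 1), sgn * (n - m))

def solve_alt (n : Int) (l : Int) (r : Int) : Int :=
  let p1 := solveAltPos n l
  let p2 := solveAltPos n r
  |p1.1 - p2.1| + |p1.2 - p2.2|

-- ===== PRECONDITION & SPEC =====
def Spec_solve (n : Int) (l : Int) (r : Int) (out : Int) : Prop := out = solve_alt n l r
instance (n : Int) (l : Int) (r : Int) (out : Int) : Decidable (Spec_solve n l r out) := by unfold Spec_solve; infer_instance

-- ===== CLAIM (what is proved, stated in full; the proofs are below) =====
def Claim_equal_solve : Prop := ∀ (n : Int) (l : Int) (r : Int), Dom_solve n l r → Spec_solve n l r (solve n l r)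

-- ===== LEMMAS AND PROOFS =====

-- B's closed form for the least m with target ≤ m*m, clamped into [1, n+1]
def cform (n target : Int) : Int :=
  max 1 (min (n + 1) ((Nat.sqrt (max (target - 1) 0).toNat : Int) + 1))

lemma sq_mono {a b : Int} (ha : 0 ≤ a) (hab : a ≤ b) : a * a ≤ b * b := by nlinarith

-- the closed form satisfies the "least root" characterisation on [1, n+1]
lemma cform_props (n target : Int) :
    1 ≤ cform n target ∧ cform n target ≤ max 1 (n + 1) ∧
    (∀ m, 1 ≤ m → m < cform n target → m * m < target) ∧
    (∀ m, cform n target ≤ m → m ≤ n → target ≤ m * m) := by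
  set k : Nat := (max (target - 1) 0).toNat with hk
  have hk1 : (k : Int) = max (target - 1) 0 := by
    rw [hk]; exact Int.toNat_of_nonneg (le_max_right _ _)
  set s : Nat := Nat.sqrt k with hs
  have h1 : (s : Int) * s ≤ max (target - 1) 0 := by
    rw [← hk1]
    have := Nat.sqrt_le' k
    rw [pow_two] at this
    exact_mod_cast this
  have h2 : max (target - 1) 0 < ((s : Int) + 1) * ((s : Int) + 1) := by
    rw [← hk1]
    have := Nat.lt_succ_sqrt' k
    rw [Nat.succ_eq_add_one, pow_two] at this
    exact_mod_cast this
  have hlow : ∀ m : Int, 1 ≤ m → m ≤ (s : Int) → m * m < target := by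
    intro m hm1 hms
    have h3 := sq_mono (by omega : (0:Int) ≤ m) hms
    have h4 : m * m ≤ max (target - 1) 0 := le_trans h3 h1
    have hm : 1 ≤ m * m := by nlinarith
    omega
  have hhigh : ∀ m : Int, (s : Int) + 1 ≤ m → target ≤ m * m := by
    intro m hm
    have := sq_mono (by positivity : (0:Int) ≤ (s:Int) + 1) hm
    omega
  unfold cform
  rw [← hk, ← hs]
  refine ⟨le_max_left _ _, ?_, ?_, ?_⟩
  · rcases le_total (n + 1) ((s : Int) + 1) with h | h <;> simp [min_def, max_def] <;> omega
  · intro m hm1 hm2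
    have : m ≤ (s : Int) := by
      rcases le_total (n + 1) ((s : Int) + 1) with h | h <;>
        simp only [min_def, max_def] at hm2 <;> split_ifs at hm2 <;> omega
    exact hlow m hm1 this
  · intro m hm1 hm2
    apply hhigh m
    rcases le_total (n + 1) ((s : Int) + 1) with h | h <;>
      simp only [min_def, max_def] at hm1 <;> split_ifs at hm1 <;> omega

lemma solveCalcLoop_eq (n target : Int) :
    ∀ lo hi : Int, 1 ≤ lo → hi ≤ n → lo ≤ max 1 (n + 1) →
    (∀ m, 1 ≤ m → m < lo → m * m < target) →
    (∀ m, hi < m → m ≤ n → target ≤ m * m) →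
    solveCalcLoop n target lo hi = cform n target := by
  intro lo hi
  induction lo, hi using solveCalcLoop.induct target with
  | case1 lo hi h mid ht ih =>
    intro h1 h2 h3 h4 h5
    have hmid := PySem.Int.floordiv_two_mid_bounds h
    rw [solveCalcLoop, dif_pos h, if_pos ht]
    exact ih h1 (by omega) h3 h4
      (fun m hm1 hm2 => le_trans ht (sq_mono (by omega) (by omega)))
  | case2 lo hi h mid ht ih =>
    intro h1 h2 h3 h4 h5
    have hmid := PySem.Int.floordiv_two_mid_bounds h
    rw [solveCalcLoop, dif_pos h, if_neg ht]
    rw [not_le] at ht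
    exact ih (by omega) h2 (by omega)
      (fun m hm1 hm2 => by
        have : m * m ≤ mid * mid := sq_mono (by omega) (by omega)
        omega) h5
  | case3 lo hi h =>
    intro h1 h2 h3 h4 h5
    rw [solveCalcLoop, dif_neg h]
    rw [not_le] at h
    obtain ⟨hc1, hc2, hc3, hc4⟩ := cform_props n target
    by_contra hne
    rcases lt_or_gt_of_ne hne with hlt | hgt
    · have hn : cform n target ≤ n + 1 := by
        have h6 : 2 ≤ cform n target := by omega
        unfold cform at h6 ⊢
        omega
      exact absurd (h5 lo (by omega) (by omega)) (not_le.mpr (hc3 lo h1 hlt))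
    · have hn : lo ≤ n + 1 := by
        have : 2 ≤ lo := by omega
        omega
      exact absurd (hc4 (cform n target) le_rfl (by omega))
        (not_le.mpr (h4 (cform n target) hc1 hgt))

lemma calc_lo_eq (n target : Int) : solveCalcLoop n target 1 n = cform n target := by
  apply solveCalcLoop_eq n target 1 n le_rfl le_rfl (le_max_left _ _)
  · intro m hm1 hm2; omega
  · intro m hm1 hm2; omega

lemma pos_eq (n t : Int) : solvePos n t = solveAltPos n t := by
  by_cases h : t ≤ n * n
  · simp only [solvePos, solveAltPos, solveCalc, gt_iff_lt, if_pos h, if_neg (not_lt.mpr h),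
      calc_lo_eq]
    unfold cform
    rw [Prod.mk.injEq]
    constructor <;> ring
  · simp only [solvePos, solveAltPos, solveCalc, gt_iff_lt, if_neg h, if_pos (not_le.mp h),
      calc_lo_eq]
    unfold cform
    rw [Prod.mk.injEq]
    constructor <;> ring

-- ===== VERDICT (by name: the statement is the Claim_ definition above) =====
theorem solve_spec : Claim_equal_solve := by
  intro n l r _
  unfold Spec_solve solve solve_alt
  rw [pos_eq, pos_eq]
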